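-- pv_equiv track=rewrite | github.com/FrankDengAI/ExamHandOCR | metrics/esa_cer.py | tokenize_with_math_regions
-- ===== SOURCE A (Python) =====
-- from typing import List, Dict, Optional, Tuple, Union
--
-- def tokenize_with_math_regions(text: str) -> List[Tuple[str, bool]]:
--     """
--     Tokenize text and identify mathematical regions.
--
--     Parses LaTeX math delimiters (\( ... \)) to track when we are
--     in math mode, as all tokens inside math mode are weighted higher.
--
--     Args:
--         text: Input text with possible LaTeX math expressions
--
--     Returns:
--         List of (token, is_math_region) tuples
--     """
--     tokens = []
--     i = 0
--     in_math = False
--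
--     while i < len(text):
--         # Check for LaTeX math delimiters
--         # Inline math: \( ... \)
--         if text[i:i+2] == '\\(':
--             in_math = True
--             i += 2
--             continue
--         elif text[i:i+2] == '\\)':
--             in_math = False
--             i += 2
--             continue
--
--         # Display math: \[ ... \]
--         if text[i:i+2] == '\\[':
--             in_math = True
--             i += 2
--             continue
--         elif text[i:i+2] == '\\]':
--             in_math = False
--             i += 2
--             continue
--
--         # Add token with math region flag
--         tokens.append((text[i], in_math))
--         i += 1
--
--     return tokens
-- ===== SOURCE B (Python) =====
-- from typing import List, Tuple
--
-- def tokenize_with_math_regions(text: str) -> List[Tuple[str, bool]]: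
--     # Split once on backslash; every later piece was preceded by a backslash.
--     # A piece starting with one of '()[]' marks a math delimiter (toggle and
--     # drop that char); otherwise the backslash was a literal character.
--     parts = text.split('\\')
--     out = [(c, False) for c in parts[0]]
--     in_math = False
--     for part in parts[1:]:
--         if part[:1] in ('(', '['):
--             in_math = True
--             body = part[1:]
--         elif part[:1] in (')', ']'):
--             in_math = False
--             body = part[1:]
--         else:
--             body = '\\' + part
--         out.extend((c, in_math) for c in body)
--     return out
-- ===== Notes on version B (the rewrite author's own statement) =====
-- stated objective: faster
-- what changed: B replaces A's char-by-char index scan with two-character slice comparisons at every position by a single split on backslash followed by one fold over the pieces, classifying each piece's first character to toggle math mode.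
import Mathlib
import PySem

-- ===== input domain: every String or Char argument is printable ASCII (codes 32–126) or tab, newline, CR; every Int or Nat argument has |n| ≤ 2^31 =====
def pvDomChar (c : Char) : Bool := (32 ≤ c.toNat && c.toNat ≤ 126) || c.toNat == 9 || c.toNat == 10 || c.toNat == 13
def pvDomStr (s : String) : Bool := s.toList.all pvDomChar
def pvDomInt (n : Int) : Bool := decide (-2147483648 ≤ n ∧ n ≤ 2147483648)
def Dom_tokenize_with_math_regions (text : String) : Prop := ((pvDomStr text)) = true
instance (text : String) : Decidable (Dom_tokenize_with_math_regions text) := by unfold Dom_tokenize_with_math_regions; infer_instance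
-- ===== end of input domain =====

-- B tokenizes by splitting once on backslash and folding over the pieces instead of
-- A's per-index scan with two-character slice comparisons; same return value,
-- measurably faster by constant factor (split does the delimiter search in bulk).

-- ===== PORT A =====
-- A's while-loop over index i, as structural recursion on the remaining characters;
-- text[i:i+2] == '\\(' etc. becomes a take-2 comparison on the remainder.
def tokA : List Char → Bool → List (String × Bool)
  | [], _ => []
  | c :: rest, in_math =>
    if (c :: rest).take 2 = ['\\', '('] then tokA rest.tail true
    else if (c :: rest).take 2 = ['\\', ')'] then tokA rest.tail false
    else if (c :: rest).take 2 = ['\\', '['] then tokA rest.tail true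
    else if (c :: rest).take 2 = ['\\', ']'] then tokA rest.tail false
    else (String.ofList [c], in_math) :: tokA rest in_math
  termination_by cs _ => cs.length
  decreasing_by all_goals simp [List.length_tail]

def tokenize_with_math_regions (text : String) : List (String × Bool) :=
  tokA text.toList false

-- ===== PORT B =====
-- loop body of Source B: one step of the fold over parts[1:]
def tokBstep (acc : List (String × Bool) × Bool) (part : List Char) : List (String × Bool) × Bool :=
  if part.take 1 = ['('] ∨ part.take 1 = ['['] then
    (acc.1 ++ (part.drop 1).map (fun c => (String.ofList [c], true)), true)
  else if part.take 1 = [')'] ∨ part.take 1 = [']'] then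
    (acc.1 ++ (part.drop 1).map (fun c => (String.ofList [c], false)), false)
  else
    (acc.1 ++ ('\\' :: part).map (fun c => (String.ofList [c], acc.2)), acc.2)

def tokenize_with_math_regions_alt (text : String) : List (String × Bool) :=
  match PySem.Chars.splitOn text.toList ['\\'] with
  | [] => []   -- unreachable: split always returns at least one piece
  | p0 :: rest => (rest.foldl tokBstep (p0.map (fun c => (String.ofList [c], false)), false)).1

-- ===== PRECONDITION & SPEC =====
def Spec_tokenize_with_math_regions (text : String) (out : List (String × Bool)) : Prop := out = tokenize_with_math_regions_alt text
instance (text : String) (out : List (String × Bool)) : Decidable (Spec_tokenize_with_math_regions text out) := by unfold Spec_tokenize_with_math_regions; infer_instance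

-- ===== CLAIM (what is proved, stated in full; the proofs are below) =====
def Claim_equal_tokenize_with_math_regions : Prop := ∀ (text : String), Dom_tokenize_with_math_regions text → Spec_tokenize_with_math_regions text (tokenize_with_math_regions text)

-- ===== LEMMAS AND PROOFS =====

-- reference split on '\\' (proof-side characterisation of PySem.Chars.splitOn)
def consHead (p : List Char) : List (List Char) → List (List Char)
  | [] => [p]
  | x :: xs => (p ++ x) :: xs

def mySplit : List Char → List (List Char)
  | [] => [[]]
  | c :: r => if c = '\\' then [] :: mySplit r else consHead [c] (mySplit r)

theorem mySplit_ne_nil (cs : List Char) : mySplit cs ≠ [] := by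
  cases cs with
  | nil => simp [mySplit]
  | cons c r =>
    simp only [mySplit]
    split
    · simp
    · cases h : mySplit r <;> simp [consHead]

theorem consHead_consHead (p q : List Char) (l : List (List Char)) :
    consHead p (consHead q l) = consHead (p ++ q) l := by
  cases l <;> simp [consHead]

theorem go_spec (fuel : Nat) (l cur : List Char) (acc : List (List Char))
    (h : l.length < fuel) :
    PySem.Chars.splitOn.go ['\\'] fuel l cur acc
      = acc.reverse ++ consHead cur.reverse (mySplit l) := by
  induction fuel generalizing l cur acc with
  | zero => omega
  | succ fuel ih =>
    cases l with
    | nil => simp [PySem.Chars.splitOn.go, mySplit, consHead]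
    | cons c rest =>
      rw [PySem.Chars.splitOn.go]
      by_cases hc : c = '\\'
      · subst hc
        have hp : List.isPrefixOf ['\\'] ('\\' :: rest) = true := by
          simp [List.isPrefixOf]
        simp only [hp, if_true]
        rw [show List.drop ['\\'].length ('\\' :: rest) = rest from rfl]
        rw [ih rest [] (cur.reverse :: acc) (by simpa using Nat.lt_of_succ_lt_succ h)]
        cases hms : mySplit rest with
        | nil => exact absurd hms (mySplit_ne_nil _)
        | cons y ys => simp [mySplit, consHead, hms]
      · have hp : List.isPrefixOf ['\\'] (c :: rest) = false := by
          simp [List.isPrefixOf]; exact fun e => hc e.symm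
        simp only [hp, Bool.false_eq_true, if_false]
        rw [ih rest (c :: cur) acc (by simpa using Nat.lt_of_succ_lt_succ h)]
        simp [mySplit, hc, consHead_consHead, List.reverse_cons]

theorem splitOn_eq_mySplit (cs : List Char) :
    PySem.Chars.splitOn cs ['\\'] = mySplit cs := by
  unfold PySem.Chars.splitOn
  rw [go_spec (cs.length + 1) cs [] [] (by omega)]
  cases hms : mySplit cs with
  | nil => exact absurd hms (mySplit_ne_nil _)
  | cons y ys => simp [consHead]

-- run B's fold given the pieces
def runB (ps : List (List Char)) (m : Bool) (out : List (String × Bool)) : List (String × Bool) :=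
  match ps with
  | [] => out
  | p0 :: rest => (rest.foldl tokBstep (out ++ p0.map (fun c => (String.ofList [c], m)), m)).1

theorem mySplit_cons_ne (c : Char) (rest : List Char) (hc : ¬ c = '\\') :
    ∃ h t, mySplit rest = h :: t ∧ mySplit (c :: rest) = (c :: h) :: t := by
  cases hx : mySplit rest with
  | nil => exact absurd hx (mySplit_ne_nil _)
  | cons a b => exact ⟨a, b, rfl, by simp [mySplit, hc, hx, consHead]⟩

theorem mySplit_bs (r : List Char) : mySplit ('\\' :: r) = [] :: mySplit r := by
  conv_lhs => rw [mySplit]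
  simp

-- LHS (B-side) step lemmas
theorem runB_ord (c : Char) (rest : List Char) (m : Bool) (out : List (String × Bool))
    (hc : ¬ c = '\\') :
    runB (mySplit (c :: rest)) m out
      = runB (mySplit rest) m (out ++ [(String.ofList [c], m)]) := by
  obtain ⟨h2, t2, hx2, hxc⟩ := mySplit_cons_ne c rest hc
  rw [hx2, hxc]
  simp [runB]

theorem runB_open (d : Char) (rest2 : List Char) (m : Bool) (out : List (String × Bool))
    (hd : d = '(' ∨ d = '[') :
    runB (mySplit ('\\' :: d :: rest2)) m out = runB (mySplit rest2) true out := by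
  obtain ⟨h2, t2, hx2, hxc⟩ := mySplit_cons_ne d rest2 (by rcases hd with rfl | rfl <;> decide)
  rw [mySplit_bs, hxc, hx2]
  rcases hd with rfl | rfl <;> simp [runB, tokBstep]

theorem runB_close (d : Char) (rest2 : List Char) (m : Bool) (out : List (String × Bool))
    (hd : d = ')' ∨ d = ']') :
    runB (mySplit ('\\' :: d :: rest2)) m out = runB (mySplit rest2) false out := by
  obtain ⟨h2, t2, hx2, hxc⟩ := mySplit_cons_ne d rest2 (by rcases hd with rfl | rfl <;> decide)
  rw [mySplit_bs, hxc, hx2]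
  rcases hd with rfl | rfl <;> simp [runB, tokBstep]

theorem runB_bs (rest : List Char) (m : Bool) (out : List (String × Bool))
    (h : rest = [] ∨ ∃ d r, rest = d :: r ∧ d ≠ '(' ∧ d ≠ ')' ∧ d ≠ '[' ∧ d ≠ ']') :
    runB (mySplit ('\\' :: rest)) m out
      = runB (mySplit rest) m (out ++ [(String.ofList ['\\'], m)]) := by
  rcases h with rfl | ⟨d, r, rfl, h1, h2, h3, h4⟩
  · simp [mySplit, runB, tokBstep]
  · by_cases hd : d = '\\'
    · subst hd
      cases hx : mySplit r with
      | nil => exact absurd hx (mySplit_ne_nil _)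
      | cons a b =>
        rw [mySplit_bs, mySplit_bs, hx]
        simp [runB, tokBstep]
    · obtain ⟨h2l, t2, hx2, hxc⟩ := mySplit_cons_ne d r hd
      rw [mySplit_bs, hxc]
      simp [runB, tokBstep, h1, h2, h3, h4]

-- RHS (A-side) step lemmas
theorem tokA_ord (c : Char) (rest : List Char) (m : Bool) (hc : ¬ c = '\\') :
    tokA (c :: rest) m = (String.ofList [c], m) :: tokA rest m := by
  rw [tokA]
  simp [List.take_succ_cons, hc]

theorem tokA_open (d : Char) (rest2 : List Char) (m : Bool) (hd : d = '(' ∨ d = '[') :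
    tokA ('\\' :: d :: rest2) m = tokA rest2 true := by
  rw [tokA]
  rcases hd with rfl | rfl <;> simp [List.take_succ_cons]

theorem tokA_close (d : Char) (rest2 : List Char) (m : Bool) (hd : d = ')' ∨ d = ']') :
    tokA ('\\' :: d :: rest2) m = tokA rest2 false := by
  rw [tokA]
  rcases hd with rfl | rfl <;> simp [List.take_succ_cons]

theorem tokA_bs (rest : List Char) (m : Bool)
    (h : rest = [] ∨ ∃ d r, rest = d :: r ∧ d ≠ '(' ∧ d ≠ ')' ∧ d ≠ '[' ∧ d ≠ ']') :
    tokA ('\\' :: rest) m = (String.ofList ['\\'], m) :: tokA rest m := by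
  rcases h with rfl | ⟨d, r, rfl, h1, h2, h3, h4⟩
  · simp [tokA]
  · rw [tokA]; simp [List.take_succ_cons, h1, h2, h3, h4]

theorem runB_eq_tokA (cs : List Char) (m : Bool) (out : List (String × Bool)) :
    runB (mySplit cs) m out = out ++ tokA cs m := by
  cases cs with
  | nil => simp [mySplit, runB, tokA]
  | cons c rest =>
    by_cases hc : c = '\\'
    · subst hc
      cases rest with
      | nil =>
        rw [runB_bs [] m out (Or.inl rfl), tokA_bs [] m (Or.inl rfl)]
        simp [mySplit, runB, tokA]
      | cons d rest2 =>
        by_cases ho : d = '(' ∨ d = '['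
        · rw [runB_open d rest2 m out ho, tokA_open d rest2 m ho,
              runB_eq_tokA rest2 true out]
        · by_cases hcl : d = ')' ∨ d = ']'
          · rw [runB_close d rest2 m out hcl, tokA_close d rest2 m hcl,
                runB_eq_tokA rest2 false out]
          · push Not at ho hcl
            have hside : d :: rest2 = [] ∨ ∃ e r, d :: rest2 = e :: r ∧
                e ≠ '(' ∧ e ≠ ')' ∧ e ≠ '[' ∧ e ≠ ']' :=
              Or.inr ⟨d, rest2, rfl, ho.1, hcl.1, ho.2, hcl.2⟩
            rw [runB_bs (d :: rest2) m out hside, tokA_bs (d :: rest2) m hside,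
                runB_eq_tokA (d :: rest2) m (out ++ [(String.ofList ['\\'], m)])]
            simp
    · rw [runB_ord c rest m out hc, tokA_ord c rest m hc, runB_eq_tokA rest m _]
      simp
  termination_by cs.length
  decreasing_by all_goals simp

-- ===== VERDICT (by name: the statement is the Claim_ definition above) =====
theorem tokenize_with_math_regions_spec : Claim_equal_tokenize_with_math_regions := by
  intro text _
  unfold Spec_tokenize_with_math_regions tokenize_with_math_regions tokenize_with_math_regions_alt
  rw [splitOn_eq_mySplit]
  have h := runB_eq_tokA text.toList false []
  cases hms : mySplit text.toList with
  | nil => exact absurd hms (mySplit_ne_nil _)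
  | cons p0 rest =>
    rw [hms] at h
    simpa [runB] using h.symm
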